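-- pv_equiv track=rewrite | github.com/f1amingo/leetcode-python | 剑指offer/剑指 Offer 45. 把数组排成最小的数.py | minNumber
-- ===== SOURCE A (Python) =====
-- import functools
-- from typing import List
--
-- def minNumber(nums: List[int]) -> str:
--     def sort_rule(x, y):
--         a, b = x + y, y + x
--         if a > b:
--             return 1
--         elif a < b:
--             return -1
--         else:
--             return 0
--
--     strs = [str(num) for num in nums]
--     strs.sort(key=functools.cmp_to_key(sort_rule))
--     return ''.join(strs)
-- ===== SOURCE B (Python) =====
-- def minNumber(nums):
--     strs = [str(n) for n in nums]
--     if not strs: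
--         return ''
--     L = 2 * max(len(s) for s in strs)
--     strs.sort(key=lambda s: (s * (L // len(s) + 1))[:L])
--     return ''.join(strs)
-- ===== Notes on version B (the rewrite author's own statement) =====
-- stated objective: faster
-- what changed: Replaces the O(n^2)-comparison cmp_to_key comparator sort with a plain key sort: each string is replaced by a fixed-length repeated-prefix key (length L = twice the longest string), exploiting that x+y < y+x iff the L-truncated infinite repetitions of x and y compare the same way.
import Mathlib
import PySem

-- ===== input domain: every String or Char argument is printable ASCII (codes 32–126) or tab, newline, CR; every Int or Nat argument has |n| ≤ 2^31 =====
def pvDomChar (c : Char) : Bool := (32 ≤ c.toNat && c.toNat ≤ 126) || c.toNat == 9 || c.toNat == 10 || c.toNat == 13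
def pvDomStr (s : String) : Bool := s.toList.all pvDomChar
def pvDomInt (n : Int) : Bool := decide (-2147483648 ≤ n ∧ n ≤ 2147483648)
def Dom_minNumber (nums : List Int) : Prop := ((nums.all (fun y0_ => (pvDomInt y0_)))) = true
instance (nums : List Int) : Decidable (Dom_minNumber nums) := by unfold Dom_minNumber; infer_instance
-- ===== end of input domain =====

-- B replaces A's cmp_to_key comparator sort by a key sort on precomputed fixed-length repeated-prefix keys; the return values are proved equal on all inputs.


-- ===== PORT A =====
-- sort_rule(x, y): compares x+y with y+x and returns 1 / -1 / 0. Python string `+` is `++`,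
-- and Python's lexicographic string comparison is Lean's String order (same code-point lex order).
def sortRule (x y : String) : Int :=
  let a := x ++ y
  let b := y ++ x
  if a > b then 1 else if a < b then -1 else 0

-- strs.sort(key=functools.cmp_to_key(sort_rule)): Python's stable sort driven by a comparator;
-- ported step for step as PySem's stable insertion-sort model of list.sort (the exact loop shape
-- of PySem.List.sorted), with "u inserted strictly before v iff sort_rule u v < 0" (= cmp_to_key).
def minNumber (nums : List Int) : String :=
  let strs := nums.map PySem.Int.toStr
  let sortedStrs :=
    strs.foldl (fun acc x => PySem.List.insertBy (fun u v => decide (sortRule u v < 0)) x acc) []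
  PySem.Str.join "" sortedStrs

-- ===== PORT B =====
-- key = lambda s: (s * (L // len(s) + 1))[:L] — string repetition s * k is PySem.List.pyRepeat on
-- the code points (k concatenated copies; exact), [:L] is the Python slice.
def bKey (L : Int) (s : String) : String :=
  String.ofList
    (PySem.List.slice
      (PySem.List.pyRepeat s.toList (PySem.Int.floordiv L (PySem.Str.len s) + 1)) none (some L))

-- `if not strs: return ''` and `L = 2 * max(len(s) for s in strs)` ported together through
-- PySem.List.max?, which is none exactly on the empty list; then the key sort and join.
def minNumber_alt (nums : List Int) : String :=
  let strs := nums.map PySem.Int.toStr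
  match PySem.List.max? (strs.map PySem.Str.len) (fun x => x) with
  | none => ""
  | some m =>
    let L := 2 * m
    PySem.Str.join "" (PySem.List.sorted strs (bKey L) false)

-- ===== PRECONDITION & SPEC =====
def Spec_minNumber (nums : List Int) (out : String) : Prop := out = minNumber_alt nums
instance (nums : List Int) (out : String) : Decidable (Spec_minNumber nums out) := by unfold Spec_minNumber; infer_instance

-- ===== CLAIM (what is proved, stated in full; the proofs are below) =====
def Claim_equal_minNumber : Prop := ∀ (nums : List Int), Dom_minNumber nums → Spec_minNumber nums (minNumber nums)

-- ===== LEMMAS AND PROOFS =====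
-- The mathematical core: for nonempty strings a, b and any L ≥ |a| + |b|,
--   a ++ b < b ++ a  ↔  (first L chars of a·a·a·…) < (first L chars of b·b·b·…)   (main_iff),
-- proved via the streams rho a, rho b (i-th char of the infinite repetition): a++b = b++a forces
-- the streams to coincide (comm_rho), while a++b < b++a locates a first stream difference below
-- |a| + |b| (lt_firstdiff). This makes A's comparator agree pointwise with B's key order on the
-- strings being sorted, so the two stable insertion sorts coincide (foldl_insertBy_congr).

def rho (a : List Char) (i : Nat) : Char := a.getD (i % a.length) 'x'

theorem rho_period (a : List Char) (i : Nat) : rho a (i + a.length) = rho a i := by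
  unfold rho; rw [Nat.add_mod_right]

theorem rho_lt (a : List Char) {i : Nat} (h : i < a.length) : rho a i = a.getD i 'x' := by
  unfold rho; rw [Nat.mod_eq_of_lt h]

-- multiples of the period

theorem two_period (f g : Nat → Char) (p q : Nat) (hp : 0 < p) (hq : 0 < q)
    (hf : ∀ i, f (i + p) = f i) (hg : ∀ i, g (i + q) = g i)
    (h : ∀ i < p + q, f i = g i) : ∀ i, f i = g i := by
  intro i
  induction i using Nat.strong_induction_on with
  | _ i ih =>
    by_cases hi : i < p + q
    · exact h i hi
    · obtain ⟨j, rfl⟩ : ∃ j, i = j + q + p := ⟨i - q - p, by omega⟩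
      calc f (j + q + p) = f (j + q) := hf _
        _ = g (j + q) := ih _ (by omega)
        _ = g j := hg _
        _ = f j := (ih _ (by omega)).symm
        _ = f (j + p) := (hf _).symm
        _ = g (j + p) := ih _ (by omega)
        _ = g (j + q + p) := by rw [show j + q + p = (j + p) + q by ring, hg]

-- if a is a strict prefix decomposition b = a ++ c with a++c = c++a … getD of b

theorem getD_append_left {a t : List Char} {i : Nat} (h : i < a.length) :
    (a ++ t).getD i 'x' = a.getD i 'x' := by
  rw [List.getD_eq_getElem?_getD, List.getElem?_append_left h, ← List.getD_eq_getElem?_getD]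

theorem getD_append_right (a t : List Char) (j : Nat) :
    (a ++ t).getD (a.length + j) 'x' = t.getD j 'x' := by
  rw [List.getD_eq_getElem?_getD, List.getElem?_append_right (by omega)]
  rw [List.getD_eq_getElem?_getD]
  congr 2
  omega

theorem rho_step (a c : List Char) (ha : a ≠ []) (hc : c ≠ []) {j' : Nat}
    (hj' : j' < a.length + c.length) (hagree : ∀ i < j', rho a i = rho c i) :
    (∀ i < a.length + j', rho a i = rho (a ++ c) i) ∧
    rho (a ++ c) (a.length + j') = rho c j' := by
  have hp : 0 < a.length := List.length_pos_iff.mpr ha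
  have hm : 0 < c.length := List.length_pos_iff.mpr hc
  have hlen : (a ++ c).length = a.length + c.length := by simp
  constructor
  · intro i hi
    rcases lt_or_ge i a.length with h1 | h1
    · rw [rho_lt a h1, rho_lt (a ++ c) (by omega), getD_append_left h1]
    · rcases lt_or_ge i (a.length + c.length) with h2 | h2
      · obtain ⟨t, rfl⟩ : ∃ t, i = a.length + t := ⟨i - a.length, by omega⟩
        have ht : t < c.length := by omega
        have htj : t < j' := by omega
        rw [rho_lt (a ++ c) (by omega), getD_append_right]
        rw [Nat.add_comm a.length t, rho_period, hagree t htj, rho_lt c ht]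
      · obtain ⟨t, rfl⟩ : ∃ t, i = t + (a.length + c.length) := ⟨i - (a.length + c.length), by omega⟩
        have htp : t < a.length := by omega
        have htm : t + c.length < j' := by omega
        calc rho a (t + (a.length + c.length))
            = rho a (t + c.length + a.length) := by ring_nf
          _ = rho a (t + c.length) := rho_period a _
          _ = rho c (t + c.length) := hagree _ htm
          _ = rho c t := rho_period c t
          _ = rho a t := (hagree t (by omega)).symm
          _ = (a ++ c).getD t 'x' := by rw [rho_lt a htp, (getD_append_left htp).symm]
          _ = rho (a ++ c) t := (rho_lt (a ++ c) (by omega)).symm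
          _ = rho (a ++ c) (t + (a ++ c).length) := (rho_period _ _).symm
          _ = rho (a ++ c) (t + (a.length + c.length)) := by rw [hlen]
  · rcases lt_or_ge j' c.length with h1 | h1
    · rw [rho_lt (a ++ c) (by omega), getD_append_right, rho_lt c h1]
    · calc rho (a ++ c) (a.length + j')
          = rho (a ++ c) (j' - c.length + (a ++ c).length) := by rw [hlen]; congr 1; omega
        _ = rho (a ++ c) (j' - c.length) := rho_period _ _
        _ = a.getD (j' - c.length) 'x' := by
              rw [rho_lt (a ++ c) (by omega), getD_append_left (by omega)]
        _ = rho a (j' - c.length) := (rho_lt a (by omega)).symm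
        _ = rho c (j' - c.length) := hagree _ (by omega)
        _ = rho c (j' - c.length + c.length) := (rho_period c _).symm
        _ = rho c j' := by congr 1; omega

theorem eq_of_comm_eq_len {x y : List Char} (hlen : x.length = y.length)
    (h : x ++ y = y ++ x) : x = y := by
  have h2 := congrArg (List.take x.length) h
  rwa [List.take_left' rfl, List.take_append_of_le_length (by omega), List.take_of_length_le (by omega)] at h2

theorem prefix_decomp {a b : List Char} (hlt : a.length < b.length) (h : a ++ b = b ++ a) :
    b = a ++ b.drop a.length := by
  have h2 := congrArg (List.take a.length) h
  rw [List.take_left' rfl, List.take_append_of_le_length (le_of_lt hlt)] at h2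
  conv_lhs => rw [← List.take_append_drop a.length b, ← h2]

theorem comm_rho_step {N : Nat}
    (IH : ∀ x y : List Char, x.length + y.length ≤ N → x ≠ [] → y ≠ [] →
      x ++ y = y ++ x → ∀ i, rho x i = rho y i)
    (a b : List Char) (hN : a.length + b.length ≤ N + 1) (ha : a ≠ []) (hb : b ≠ [])
    (hlt : a.length < b.length) (h : a ++ b = b ++ a) : ∀ i, rho a i = rho b i := by
  have hp : 0 < a.length := List.length_pos_iff.mpr ha
  have hq : 0 < b.length := List.length_pos_iff.mpr hb
  have hpre := prefix_decomp hlt h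
  set c := b.drop a.length with hcdef
  have hclen : c.length = b.length - a.length := by simp [hcdef]
  have hcne : c ≠ [] := by intro hnil; rw [hnil] at hclen; simp at hclen; omega
  have hac : a ++ c = c ++ a := by
    have h3 : a ++ (a ++ c) = a ++ (c ++ a) := by
      have h4 : a ++ b = b ++ a := h
      rw [hpre] at h4
      simpa [List.append_assoc] using h4
    exact List.append_cancel_left h3
  have hrac : ∀ i, rho a i = rho c i :=
    IH a c (by omega) ha hcne hac
  have hstep := rho_step a c ha hcne
      (j' := a.length + c.length - 1) (by omega) (fun i _ => hrac i)
  have hclen2 : b.length = a.length + c.length := by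
    have := hpre; have := congrArg List.length this; simp at this; omega
  have hwin : ∀ i < a.length + b.length, rho a i = rho b i := by
    intro i hi
    rw [hpre]
    rcases lt_or_ge i (a.length + (a.length + c.length - 1)) with hcase | hcase
    · exact hstep.1 i hcase
    · have hieq : i = a.length + (a.length + c.length - 1) := by omega
      rw [hieq]
      calc rho a (a.length + (a.length + c.length - 1))
          = rho a ((a.length + c.length - 1) + a.length) := by rw [Nat.add_comm]
        _ = rho a (a.length + c.length - 1) := rho_period a _
        _ = rho c (a.length + c.length - 1) := hrac _
        _ = rho (a ++ c) (a.length + (a.length + c.length - 1)) := hstep.2.symm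
  exact two_period (rho a) (rho b) a.length b.length hp hq
    (rho_period a) (rho_period b) hwin

theorem comm_rho : ∀ (N : Nat) (a b : List Char), a.length + b.length ≤ N → a ≠ [] → b ≠ [] →
    a ++ b = b ++ a → ∀ i, rho a i = rho b i := by
  intro N
  induction N with
  | zero =>
    intro a b hN ha _ _ _
    exact absurd (List.length_pos_iff.mpr ha) (by omega)
  | succ N ih =>
    intro a b hN ha hb h i
    rcases lt_trichotomy a.length b.length with hlt | heq | hgt
    · exact comm_rho_step ih a b hN ha hb hlt h i
    · rw [eq_of_comm_eq_len heq h]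
    · exact (comm_rho_step ih b a (by omega) hb ha hgt h.symm i).symm

theorem lt_iff_firstdiff : ∀ (u v : List Char), u.length = v.length →
    (u < v ↔ ∃ j < u.length, (∀ i < j, u.getD i 'x' = v.getD i 'x') ∧ u.getD j 'x' < v.getD j 'x') := by
  intro u
  induction u with
  | nil =>
    intro v hv
    have : v = [] := by cases v <;> simp_all
    subst this
    simp
  | cons x u' ih =>
    intro v hv
    cases v with
    | nil => simp at hv
    | cons y v' =>
      simp only [List.length_cons] at hv
      rw [List.cons_lt_cons_iff]
      constructor
      · rintro (hxy | ⟨rfl, hlt⟩)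
        · exact ⟨0, by simp, by simp, by simpa using hxy⟩
        · obtain ⟨j, hj, hag, hv⟩ := (ih v' (by omega)).mp hlt
          refine ⟨j + 1, by simpa using hj, ?_, by simpa using hv⟩
          intro i hi
          cases i with
          | zero => simp
          | succ i => simpa using hag i (by omega)
      · rintro ⟨j, hj, hag, hv⟩
        cases j with
        | zero => left; simpa using hv
        | succ j =>
          have hx : x = y := by simpa using hag 0 (by omega)
          subst hx
          right
          refine ⟨rfl, (ih v' (by omega)).mpr ⟨j, by simpa using hj, ?_, by simpa using hv⟩⟩
          intro i hi
          simpa using hag (i + 1) (by omega)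

theorem append_left_lt_iff (w u v : List Char) : (w ++ u) < (w ++ v) ↔ u < v := by
  induction w with
  | nil => simp
  | cons c w' ih => simpa [List.cons_lt_cons_iff] using ih

theorem prefix_of_agree {a b : List Char} (hle : a.length ≤ b.length)
    (hag : ∀ i < a.length, a.getD i 'x' = b.getD i 'x') : b = a ++ b.drop a.length := by
  have : a = b.take a.length := by
    apply List.ext_getElem (by simp; omega)
    intro i h1 h2
    have h3 := hag i h1
    rw [List.getD_eq_getElem?_getD, List.getD_eq_getElem?_getD, List.getElem?_eq_getElem h1,
      List.getElem?_eq_getElem (by omega), Option.getD_some, Option.getD_some] at h3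
    rw [List.getElem_take]
    exact h3
  conv_lhs => rw [← List.take_append_drop a.length b, ← this]

theorem eq_of_agree {a b : List Char} (hlen : a.length = b.length)
    (hag : ∀ i < a.length, a.getD i 'x' = b.getD i 'x') : a = b := by
  have := prefix_of_agree (le_of_eq hlen) hag
  rw [this, List.drop_eq_nil_of_le (by omega), List.append_nil]

theorem lt_firstdiff : ∀ (N : Nat) (a b : List Char), a.length + b.length ≤ N → a ≠ [] → b ≠ [] →
    (a ++ b) < (b ++ a) →
    ∃ j < a.length + b.length, (∀ i < j, rho a i = rho b i) ∧ rho a j < rho b j := by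
  intro N
  induction N with
  | zero =>
    intro a b hN ha _ _
    exact absurd (List.length_pos_iff.mpr ha) (by omega)
  | succ N ihN =>
    intro a b hN ha hb h
    have hp : 0 < a.length := List.length_pos_iff.mpr ha
    have hq : 0 < b.length := List.length_pos_iff.mpr hb
    obtain ⟨j0, hj0, hag0, hv0⟩ :=
      (lt_iff_firstdiff (a ++ b) (b ++ a) (by simp; omega)).mp h
    simp only [List.length_append] at hj0
    rcases lt_or_ge j0 (min a.length b.length) with hsmall | hsmall
    · -- the strings differ inside their common prefix window
      refine ⟨j0, by omega, ?_, ?_⟩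
      · intro i hi
        have := hag0 i hi
        rw [getD_append_left (by omega), getD_append_left (by omega)] at this
        rw [rho_lt a (by omega), rho_lt b (by omega)]
        exact this
      · rw [rho_lt a (by omega), rho_lt b (by omega)]
        rw [getD_append_left (by omega), getD_append_left (by omega)] at hv0
        exact hv0
    · -- one is a prefix of the other
      have hagree_pref : ∀ i < min a.length b.length, a.getD i 'x' = b.getD i 'x' := by
        intro i hi
        have := hag0 i (by omega)
        rwa [getD_append_left (by omega), getD_append_left (by omega)] at this
      rcases lt_trichotomy a.length b.length with hlt | heq | hgt
      · -- b = a ++ c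
        have hpre : b = a ++ b.drop a.length :=
          prefix_of_agree (le_of_lt hlt) (fun i hi => hagree_pref i (by omega))
        set c := b.drop a.length with hcdef
        have hclen : c.length = b.length - a.length := by simp [hcdef]
        have hcne : c ≠ [] := by intro hnil; rw [hnil] at hclen; simp at hclen; omega
        have hac : (a ++ c) < (c ++ a) := by
          have h2 : a ++ b < b ++ a := h
          rw [hpre] at h2
          rw [← append_left_lt_iff a]
          calc a ++ (a ++ c) = a ++ a ++ c := by rw [List.append_assoc]
            _ < a ++ c ++ a := by simpa [List.append_assoc] using h2
            _ = a ++ (c ++ a) := by rw [List.append_assoc]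
        obtain ⟨j', hj', hag', hv'⟩ := ihN a c (by omega) ha hcne hac
        have hstep := rho_step a c ha hcne hj' hag'
        refine ⟨a.length + j', by omega, ?_, ?_⟩
        · intro i hi
          rw [hpre]
          exact hstep.1 i hi
        · rw [hpre]
          calc rho a (a.length + j') = rho a (j' + a.length) := by rw [Nat.add_comm]
            _ = rho a j' := rho_period a _
            _ < rho c j' := hv'
            _ = rho (a ++ c) (a.length + j') := hstep.2.symm
      · have hab : a = b := eq_of_agree heq (fun i hi => hagree_pref i (by omega))
        subst hab
        exact absurd h (lt_irrefl _)
      · -- a = b ++ c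
        have hpre : a = b ++ a.drop b.length :=
          prefix_of_agree (le_of_lt hgt) (fun i hi => (hagree_pref i (by omega)).symm)
        set c := a.drop b.length with hcdef
        have hclen : c.length = a.length - b.length := by simp [hcdef]
        have hcne : c ≠ [] := by intro hnil; rw [hnil] at hclen; simp at hclen; omega
        have hcb : (c ++ b) < (b ++ c) := by
          have h2 : a ++ b < b ++ a := h
          rw [hpre] at h2
          rw [← append_left_lt_iff b]
          simpa [List.append_assoc] using h2
        obtain ⟨j', hj', hag', hv'⟩ := ihN c b (by omega) hcne hb hcb
        have hstep := rho_step b c hb hcne (by omega) (fun i hi => (hag' i hi).symm)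
        refine ⟨b.length + j', by omega, ?_, ?_⟩
        · intro i hi
          rw [hpre]
          exact (hstep.1 i hi).symm
        · rw [hpre]
          calc rho (b ++ c) (b.length + j') = rho c j' := hstep.2
            _ < rho b j' := hv'
            _ = rho b (b.length + j') := by rw [Nat.add_comm]; exact (rho_period b _).symm

def keyC (L : Nat) (a : List Char) : List Char :=
  ((List.replicate (L / a.length + 1) a).flatten).take L

theorem flatten_replicate_length (k : Nat) (a : List Char) :
    (List.replicate k a).flatten.length = k * a.length := by
  induction k with
  | zero => simp
  | succ k ih => simp [List.replicate_succ, ih]; ring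

theorem getD_flatten_replicate (a : List Char) (_ha : a ≠ []) :
    ∀ (k i : Nat), i < k * a.length → ((List.replicate k a).flatten).getD i 'x' = rho a i := by
  intro k
  induction k with
  | zero => intro i hi; simp at hi
  | succ k ih =>
    intro i hi
    rw [List.replicate_succ, List.flatten_cons]
    rcases lt_or_ge i a.length with h1 | h1
    · rw [getD_append_left h1, rho_lt a h1]
    · obtain ⟨t, rfl⟩ : ∃ t, i = a.length + t := ⟨i - a.length, by omega⟩
      rw [getD_append_right, ih t (by rw [Nat.succ_mul] at hi; omega), Nat.add_comm, rho_period]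

theorem keyC_length (L : Nat) (a : List Char) (ha : a ≠ []) : (keyC L a).length = L := by
  have hp : 0 < a.length := List.length_pos_iff.mpr ha
  have h1 := Nat.div_add_mod L a.length
  have h2 := Nat.mod_lt L hp
  unfold keyC
  rw [List.length_take, flatten_replicate_length]
  have : L ≤ (L / a.length + 1) * a.length := by nlinarith [Nat.div_add_mod L a.length]
  omega

theorem keyC_getD (L : Nat) (a : List Char) (ha : a ≠ []) {i : Nat} (hi : i < L) :
    (keyC L a).getD i 'x' = rho a i := by
  have hp : 0 < a.length := List.length_pos_iff.mpr ha
  unfold keyC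
  rw [List.getD_eq_getElem?_getD, List.getElem?_take_of_lt hi, ← List.getD_eq_getElem?_getD]
  apply getD_flatten_replicate a ha
  nlinarith [Nat.div_add_mod L a.length, Nat.mod_lt L hp]

theorem main_iff (a b : List Char) (ha : a ≠ []) (hb : b ≠ []) (L : Nat)
    (hL : a.length + b.length ≤ L) :
    ((a ++ b) < (b ++ a)) ↔ keyC L a < keyC L b := by
  have hKiff : keyC L a < keyC L b ↔
      ∃ j < L, (∀ i < j, rho a i = rho b i) ∧ rho a j < rho b j := by
    rw [lt_iff_firstdiff _ _ (by rw [keyC_length L a ha, keyC_length L b hb])]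
    rw [keyC_length L a ha]
    constructor
    · rintro ⟨j, hj, hag, hv⟩
      refine ⟨j, hj, ?_, ?_⟩
      · intro i hi
        have := hag i hi
        rwa [keyC_getD L a ha (by omega), keyC_getD L b hb (by omega)] at this
      · rwa [keyC_getD L a ha hj, keyC_getD L b hb hj] at hv
    · rintro ⟨j, hj, hag, hv⟩
      refine ⟨j, hj, ?_, ?_⟩
      · intro i hi
        rw [keyC_getD L a ha (by omega), keyC_getD L b hb (by omega)]
        exact hag i hi
      · rwa [keyC_getD L a ha hj, keyC_getD L b hb hj]
  rw [hKiff]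
  constructor
  · intro h
    obtain ⟨j, hj, hag, hv⟩ := lt_firstdiff (a.length + b.length) a b (le_refl _) ha hb h
    exact ⟨j, by omega, hag, hv⟩
  · rintro ⟨j, hj, hag, hv⟩
    rcases lt_trichotomy (a ++ b) (b ++ a) with h | h | h
    · exact h
    · exact absurd (comm_rho (a.length + b.length) a b (le_refl _) ha hb h j) (by
        intro heq; rw [heq] at hv; exact lt_irrefl _ hv)
    · obtain ⟨j2, hj2, hag2, hv2⟩ := lt_firstdiff (b.length + a.length) b a (le_refl _) hb ha h
      rcases lt_trichotomy j j2 with hjj | hjj | hjj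
      · have := hag2 j hjj
        rw [this] at hv
        exact absurd hv (lt_irrefl _)
      · subst hjj
        exact absurd (hv.trans hv2) (lt_irrefl _)
      · have := hag j2 hjj
        rw [this] at hv2
        exact absurd hv2 (lt_irrefl _)

theorem tdc_ne_aux (f : Nat) : ∀ (n : Nat) (acc : List Char), acc ≠ [] → Nat.toDigitsCore 10 f n acc ≠ [] := by
  induction f with
  | zero => intro n acc h; simpa [Nat.toDigitsCore] using h
  | succ f ih =>
    intro n acc h
    rw [Nat.toDigitsCore]
    split
    · simp
    · exact ih _ _ (by simp)

theorem toChars_ne (n : Int) : PySem.Int.toChars n ≠ [] := by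
  unfold PySem.Int.toChars Nat.toDigits
  split
  · simp
  · rw [Nat.toDigitsCore]
    split
    · simp
    · exact tdc_ne_aux _ _ _ (by simp)

theorem toList_bKey (L : Nat) (s : String) (hs : s.toList ≠ []) :
    (bKey (L : Int) s).toList = keyC L s.toList := by
  have hp : 0 < s.toList.length := List.length_pos_iff.mpr hs
  unfold bKey keyC PySem.List.pyRepeat
  rw [String.toList_ofList, PySem.List.slice_to _ (b := (L : Int)) (by positivity)]
  have hdiv : PySem.Int.floordiv (L : Int) (PySem.Str.len s) = ((L / s.toList.length : Nat) : Int) := by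
    show Int.fdiv (L : Int) ((s.toList.length : Nat) : Int) = _
    rw [Int.fdiv_eq_ediv]; simp
  rw [hdiv]
  rw [show ((L / s.toList.length : Nat) : Int) + 1 = ((L / s.toList.length + 1 : Nat) : Int)
      from by push_cast; ring]
  rw [Int.toNat_natCast, Int.toNat_natCast]

theorem cmp_decide (x y : String) :
    decide (sortRule x y < 0) = decide (x.toList ++ y.toList < y.toList ++ x.toList) := by
  have hb : ((x ++ y < y ++ x) ↔ (x.toList ++ y.toList < y.toList ++ x.toList)) := by
    rw [String.lt_iff_toList_lt]; simp
  have hrule : sortRule x y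
      = if x ++ y > y ++ x then 1 else if x ++ y < y ++ x then -1 else 0 := rfl
  rw [hrule]
  by_cases h1 : x ++ y > y ++ x
  · have h2 : ¬ (x ++ y < y ++ x) := lt_asymm h1
    have h3 : ¬ (x.toList ++ y.toList < y.toList ++ x.toList) := fun hc => h2 (hb.mpr hc)
    rw [if_pos h1, decide_eq_false (by norm_num), decide_eq_false h3]
  · rw [if_neg h1]
    by_cases h2 : x ++ y < y ++ x
    · rw [if_pos h2, decide_eq_true (show (-1 : Int) < 0 by norm_num),
        decide_eq_true (hb.mp h2)]
    · have h3 : ¬ (x.toList ++ y.toList < y.toList ++ x.toList) := fun hc => h2 (hb.mpr hc)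
      rw [if_neg h2, decide_eq_false (by norm_num), decide_eq_false h3]

theorem bkey_decide (L : Nat) (x y : String) (hx : x.toList ≠ []) (hy : y.toList ≠ []) :
    decide (bKey (L : Int) x < bKey (L : Int) y)
      = decide (keyC L x.toList < keyC L y.toList) := by
  have h : (bKey (L : Int) x < bKey (L : Int) y)
      ↔ (keyC L x.toList < keyC L y.toList) := by
    rw [String.lt_iff_toList_lt, toList_bKey L x hx, toList_bKey L y hy]
  simp [h]

theorem insertBy_congr {α : Type} (p q : α → α → Bool) (x : α) :
    ∀ ys : List α, (∀ y ∈ ys, p x y = q x y) →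
      PySem.List.insertBy p x ys = PySem.List.insertBy q x ys := by
  intro ys
  induction ys with
  | nil => intro _; rfl
  | cons y ys ih =>
    intro h
    show (if p x y then x :: y :: ys else y :: PySem.List.insertBy p x ys)
        = (if q x y then x :: y :: ys else y :: PySem.List.insertBy q x ys)
    rw [h y (by simp), ih (fun z hz => h z (by simp [hz]))]

theorem foldl_insertBy_congr {α : Type} (p q : α → α → Bool) (S : α → Prop)
    (hpq : ∀ x y, S x → S y → p x y = q x y) :
    ∀ (xs acc : List α), (∀ x ∈ xs, S x) → (∀ y ∈ acc, S y) →
      xs.foldl (fun acc x => PySem.List.insertBy p x acc) acc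
        = xs.foldl (fun acc x => PySem.List.insertBy q x acc) acc := by
  intro xs
  induction xs with
  | nil => intro acc _ _; rfl
  | cons x xs ih =>
    intro acc hxs hacc
    simp only [List.foldl_cons]
    rw [insertBy_congr p q x acc (fun y hy => hpq x y (hxs x (by simp)) (hacc y hy))]
    apply ih _ (fun z hz => hxs z (by simp [hz]))
    intro z hz
    rcases (PySem.List.mem_insertBy _ _ _ _).mp hz with rfl | hz'
    · exact hxs z (by simp)
    · exact hacc z hz'

theorem minNumber_eq (nums : List Int) : minNumber nums = minNumber_alt nums := by
  unfold minNumber minNumber_alt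
  cases hmax : PySem.List.max? ((nums.map PySem.Int.toStr).map PySem.Str.len) (fun x => x) with
  | none =>
    have h1 : (nums.map PySem.Int.toStr).map PySem.Str.len = [] :=
      (PySem.List.max?_eq_none_iff _ _).mp hmax
    have h2 : nums = [] := by simpa using h1
    subst h2
    rfl
  | some m =>
    have hne : ∀ s ∈ nums.map PySem.Int.toStr, s.toList ≠ [] := by
      intro s hs
      obtain ⟨n, _, rfl⟩ := List.mem_map.mp hs
      rw [PySem.Int.toList_toStr]
      exact toChars_ne n
    obtain ⟨s₀, hs₀m, hs₀⟩ : ∃ s₀ ∈ nums.map PySem.Int.toStr, PySem.Str.len s₀ = m := by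
      have := PySem.List.max?_mem hmax
      obtain ⟨s₀, hs₀, hlen⟩ := List.mem_map.mp this
      exact ⟨s₀, hs₀, hlen⟩
    set M := s₀.toList.length with hM
    have hm : m = (M : Int) := by rw [← hs₀]; rfl
    have hM1 : 1 ≤ M := by
      have := hne s₀ hs₀m
      have : 0 < s₀.toList.length := List.length_pos_iff.mpr this
      omega
    have hle : ∀ s ∈ nums.map PySem.Int.toStr, s.toList.length ≤ M := by
      intro s hs
      have h1 := PySem.List.max?_isMax hmax (PySem.Str.len s) (List.mem_map_of_mem hs)
      simp only [hm] at h1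
      have h2 : ((s.toList.length : Nat) : Int) ≤ (M : Int) := h1
      exact_mod_cast h2
    have hL : 2 * m = ((2 * M : Nat) : Int) := by rw [hm]; push_cast; ring
    simp only [hmax]
    rw [hL, PySem.List.sorted_eq_foldl_insertBy]
    congr 1
    apply foldl_insertBy_congr _ _ (· ∈ nums.map PySem.Int.toStr) _ _ []
      (fun x hx => hx) (by simp)
    intro x y hx hy
    rw [cmp_decide, bkey_decide (2 * M) x y (hne x hx) (hne y hy)]
    have hiff := main_iff x.toList y.toList (hne x hx) (hne y hy) (2 * M)
      (by have := hle x hx; have := hle y hy; omega)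
    simp [hiff]

-- ===== VERDICT (by name: the statement is the Claim_ definition above) =====
theorem minNumber_spec : Claim_equal_minNumber := by
  intro nums _
  show minNumber nums = minNumber_alt nums
  exact minNumber_eq nums
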